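-- pv_equiv track=rewrite | github.com/Hareesh-bashyam/neurova_clinical | neurova_backend/backend/clinical/scoring/scoring_engine.py | calculate_reverse_sum
-- ===== SOURCE A (Python) =====
-- def calculate_reverse_sum(responses, reverse_items):
--     total = 0
--     for i, val in enumerate(responses, start=1):
--         if i in reverse_items:
--             total += 4 - val
--         else:
--             total += val
--     return total
-- ===== SOURCE B (Python) =====
-- def calculate_reverse_sum(responses, reverse_items):
--     responses = list(responses)
--     total = sum(responses)
--     for i in set(reverse_items):
--         if 1 <= i <= len(responses):
--             total += 4 - 2 * responses[i - 1]
--     return total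
-- ===== Notes on version B (the rewrite author's own statement) =====
-- stated objective: alternative
-- what changed: Instead of scanning every response and testing 'i in reverse_items' on each, B takes the plain sum once and adds an algebraic correction 4 - 2*responses[i-1] for each distinct in-range reverse position, iterating set(reverse_items); it trades the per-response membership test for a single pass plus per-position indexing.
import Mathlib
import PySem

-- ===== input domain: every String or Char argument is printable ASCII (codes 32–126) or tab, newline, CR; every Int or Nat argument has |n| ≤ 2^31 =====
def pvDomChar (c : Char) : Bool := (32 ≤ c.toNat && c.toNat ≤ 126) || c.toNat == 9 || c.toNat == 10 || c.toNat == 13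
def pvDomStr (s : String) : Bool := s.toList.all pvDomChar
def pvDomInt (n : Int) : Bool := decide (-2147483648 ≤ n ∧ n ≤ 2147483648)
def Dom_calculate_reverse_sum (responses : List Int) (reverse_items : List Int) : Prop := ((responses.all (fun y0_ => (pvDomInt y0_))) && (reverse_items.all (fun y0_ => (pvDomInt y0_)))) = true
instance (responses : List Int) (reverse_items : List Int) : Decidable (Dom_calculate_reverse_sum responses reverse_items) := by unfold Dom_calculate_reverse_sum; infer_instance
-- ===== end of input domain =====

-- B replaces A's per-response membership scan by one plain sum plus an algebraic
-- correction 4 - 2*responses[i-1] per distinct in-range reverse position (objective: alternative).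

-- ===== PORT A =====
-- for i, val in enumerate(responses, start=1): total += (4 - val) if i in reverse_items else val
def pvLoopA : List Int → Int → Int → List Int → Int
  | [], _, total, _ => total
  | v :: rest, i, total, r =>
      pvLoopA rest (i + 1) (if r.contains i then total + (4 - v) else total + v) r

def calculate_reverse_sum (responses : List Int) (reverse_items : List Int) : Int :=
  pvLoopA responses 1 0 reverse_items

-- ===== PORT B =====
-- total = sum(responses); for i in set(reverse_items): if 1 <= i <= len: total += 4 - 2*responses[i-1]
def calculate_reverse_sum_alt (responses : List Int) (reverse_items : List Int) : Int :=
  (PySem.Set.ofList reverse_items).foldl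
    (fun total i =>
      if 1 ≤ i ∧ i ≤ (responses.length : Int) then
        total + (4 - 2 * ((PySem.List.pyGet? responses (i - 1)).getD 0))
      else total)
    responses.sum

-- ===== PRECONDITION & SPEC =====
def Spec_calculate_reverse_sum (responses : List Int) (reverse_items : List Int) (out : Int) : Prop := out = calculate_reverse_sum_alt responses reverse_items
instance (responses : List Int) (reverse_items : List Int) (out : Int) : Decidable (Spec_calculate_reverse_sum responses reverse_items out) := by unfold Spec_calculate_reverse_sum; infer_instance

-- ===== CLAIM (what is proved, stated in full; the proofs are below) =====
def Claim_equal_calculate_reverse_sum : Prop := ∀ (responses : List Int) (reverse_items : List Int), Dom_calculate_reverse_sum responses reverse_items → Spec_calculate_reverse_sum responses reverse_items (calculate_reverse_sum responses reverse_items)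

-- ===== LEMMAS AND PROOFS =====

-- A's loop without the accumulator
def pvG : List Int → Int → List Int → Int
  | [], _, _ => 0
  | v :: rest, i, r => (if r.contains i then 4 - v else v) + pvG rest (i + 1) r

theorem pvLoopA_eq_g (rs : List Int) : ∀ (i t : Int) (r : List Int),
    pvLoopA rs i t r = t + pvG rs i r := by
  induction rs with
  | nil => intro i t r; simp [pvLoopA, pvG]
  | cons v rest ih =>
      intro i t r
      simp only [pvLoopA, pvG, ih]
      split <;> ring

theorem pvG_congr (rs : List Int) : ∀ (i : Int) {r s : List Int},
    (∀ x, r.contains x = s.contains x) → pvG rs i r = pvG rs i s := by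
  induction rs with
  | nil => intro i r s _; rfl
  | cons v rest ih =>
      intro i r s h
      simp only [pvG, h i, ih (i + 1) h]

theorem pvG_nil (rs : List Int) : ∀ i : Int, pvG rs i [] = rs.sum := by
  induction rs with
  | nil => intro i; rfl
  | cons v rest ih => intro i; simp [pvG, ih]

-- correction added by one reverse position j when the loop starts at index i
def pvCorr (rs : List Int) (i j : Int) : Int :=
  if i ≤ j ∧ j < i + rs.length then 4 - 2 * ((PySem.List.pyGet? rs (j - i)).getD 0) else 0

theorem pvG_cons (rs : List Int) : ∀ (i j : Int) (s : List Int), s.contains j = false →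
    pvG rs i (j :: s) = pvG rs i s + pvCorr rs i j := by
  induction rs with
  | nil =>
      intro i j s _
      simp only [pvG, pvCorr, List.length_nil]
      rw [if_neg (by omega)]
      simp
  | cons v rest ih =>
      intro i j s hjs
      by_cases hij : i = j
      · subst hij
        have h1 : (i :: s).contains i = true := by simp
        have hc0 : pvCorr rest (i + 1) i = 0 := by
          simp only [pvCorr]; rw [if_neg (by omega)]
        have hc : pvCorr (v :: rest) i i = 4 - 2 * v := by
          simp only [pvCorr, List.length_cons]
          rw [if_pos (by push_cast; omega), sub_self, PySem.List.pyGet?_zero]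
          simp
        simp only [pvG, h1, hjs, ih (i + 1) i s hjs, hc0, hc, if_true,
          Bool.false_eq_true, if_false]
        ring
      · have h1 : (j :: s).contains i = s.contains i := by
          simp [(by omega : ¬ i = j)]
        have hcorr : pvCorr rest (i + 1) j = pvCorr (v :: rest) i j := by
          simp only [pvCorr, List.length_cons]
          by_cases hr : i + 1 ≤ j ∧ j < i + 1 + (rest.length : Int)
          · rw [if_pos hr, if_pos (by push_cast; omega)]
            have hget : PySem.List.pyGet? (v :: rest) (j - i)
                = PySem.List.pyGet? rest (j - (i + 1)) := by
              rw [PySem.List.pyGet?_of_nonneg (v :: rest) (i := j - i) (by omega),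
                  PySem.List.pyGet?_of_nonneg rest (i := j - (i + 1)) (by omega)]
              have h3 : (j - i).toNat = (j - (i + 1)).toNat + 1 := by omega
              rw [h3, List.getElem?_cons_succ]
            rw [hget]
          · rw [if_neg hr, if_neg (by push_cast; omega)]
        simp only [pvG, h1, ih (i + 1) j s hjs, hcorr]
        split <;> ring

-- B's fold without the accumulator
def pvH (rs : List Int) : List Int → Int
  | [] => 0
  | j :: s => pvCorr rs 1 j + pvH rs s

theorem pvFoldB (rs : List Int) : ∀ (s : List Int) (t : Int),
    s.foldl (fun total i =>
      if 1 ≤ i ∧ i ≤ (rs.length : Int) then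
        total + (4 - 2 * ((PySem.List.pyGet? rs (i - 1)).getD 0))
      else total) t = t + pvH rs s := by
  intro s
  induction s with
  | nil => intro t; simp [pvH]
  | cons j s ih =>
      intro t
      simp only [List.foldl_cons, pvH, ih]
      have : pvCorr rs 1 j = if 1 ≤ j ∧ j ≤ (rs.length : Int) then
          4 - 2 * ((PySem.List.pyGet? rs (j - 1)).getD 0) else 0 := by
        simp only [pvCorr]
        by_cases h : 1 ≤ j ∧ j ≤ (rs.length : Int)
        · rw [if_pos (by omega), if_pos h]
        · rw [if_neg (by omega), if_neg h]
      rw [this]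
      split <;> ring

theorem pvG_eq_sum_h (rs : List Int) : ∀ (s : List Int), s.Nodup →
    pvG rs 1 s = rs.sum + pvH rs s := by
  intro s
  induction s with
  | nil => intro _; simp [pvH, pvG_nil]
  | cons j s ih =>
      intro hnd
      have hjs : s.contains j = false := by
        simp only [List.nodup_cons] at hnd
        simpa using hnd.1
      rw [pvG_cons rs 1 j s hjs, ih hnd.of_cons]
      simp only [pvH]; ring

-- ===== VERDICT (by name: the statement is the Claim_ definition above) =====
theorem calculate_reverse_sum_spec : Claim_equal_calculate_reverse_sum := by
  intro rs r _
  unfold Spec_calculate_reverse_sum calculate_reverse_sum calculate_reverse_sum_alt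
  rw [pvLoopA_eq_g, pvFoldB,
      pvG_congr rs 1 (r := r) (s := PySem.Set.ofList r)
        (by intro x; simp [PySem.Set.mem_ofList]),
      pvG_eq_sum_h rs _ (PySem.Set.nodup_ofList r)]
  ring
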